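-- pv_equiv track=rewrite | github.com/ArturSavchuk/decision_support | Lab2/optimization of binary relations .py | get_blockers_by_R_strict
-- ===== SOURCE A (Python) =====
-- def get_blockers_by_R_strict(relation):
--     blockers = []
--     for j in range(0, len(relation)):
--         is_blocker = True
--         for i in range(0, len(relation)):
--             if relation[i][j] != 0 and j != i:
--                 is_blocker = False
--                 break
--         if is_blocker:
--             blockers.append(j)
--
--     return blockers
-- ===== SOURCE B (Python) =====
-- def get_blockers_by_R_strict(relation):
--     cand = list(range(len(relation)))
--     for i, row in enumerate(relation):
--         cand = [j for j in cand if j == i or row[j] == 0]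
--     return cand
-- ===== Notes on version B (the rewrite author's own statement) =====
-- stated objective: alternative
-- what changed: Replaces the per-column nested scan with an early break by a candidate sieve: start with all column indices and let each row filter the surviving candidate list, so no inner per-column loop and no boolean table exist.
-- outside the precondition, e.g. on get_blockers_by_R_strict([[0, 1], [1]]): A returns [], B returns []
import Mathlib
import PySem

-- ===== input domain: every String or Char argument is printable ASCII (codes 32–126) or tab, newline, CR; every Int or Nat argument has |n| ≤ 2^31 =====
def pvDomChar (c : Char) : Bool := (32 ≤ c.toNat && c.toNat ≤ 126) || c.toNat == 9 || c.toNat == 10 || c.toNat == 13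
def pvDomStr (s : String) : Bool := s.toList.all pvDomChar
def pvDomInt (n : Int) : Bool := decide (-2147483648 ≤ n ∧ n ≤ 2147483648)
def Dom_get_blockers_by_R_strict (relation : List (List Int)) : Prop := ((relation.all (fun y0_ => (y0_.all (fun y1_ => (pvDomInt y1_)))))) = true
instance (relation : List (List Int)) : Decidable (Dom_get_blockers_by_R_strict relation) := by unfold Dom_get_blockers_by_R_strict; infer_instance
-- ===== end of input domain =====

-- B replaces A's per-column scan (with early break) by a candidate sieve: start from all column
-- indices, let each row filter the surviving candidate list (objective: alternative, same cost).

-- ===== PORT A =====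
-- inner 'for i in range(0, len(relation)): if relation[i][j] != 0 and j != i: is_blocker = False; break'
def pvAScan (relation : List (List Int)) (j : Int) : List Int → Bool
  | [] => true
  | i :: rest =>
    if PySem.List.pyGetD (PySem.List.pyGetD relation i []) j 0 ≠ 0 ∧ j ≠ i then false
    else pvAScan relation j rest

def get_blockers_by_R_strict (relation : List (List Int)) : List Int :=
  (PySem.List.pyRange 0 (relation.length : Int) 1).foldl
    (fun blockers j =>
      if pvAScan relation j (PySem.List.pyRange 0 (relation.length : Int) 1)
      then blockers ++ [j] else blockers) []

-- ===== PORT B =====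
-- 'for i, row in enumerate(relation): cand = [j for j in cand if j == i or row[j] == 0]'
def get_blockers_by_R_strict_alt (relation : List (List Int)) : List Int :=
  (PySem.List.enumerate relation).foldl
    (fun cand ir => cand.filter (fun j => decide (j = ir.1) || decide (PySem.List.pyGetD ir.2 j 0 = 0)))
    (PySem.List.pyRange 0 (relation.length : Int) 1)

-- ===== PRECONDITION & SPEC =====
-- Pre_ restricts to the natural domain of square-shaped input: every row at least len(relation)
-- long; on ragged shorter rows A or B can raise IndexError (A does still return on some of them).
def Pre_get_blockers_by_R_strict (relation : List (List Int)) : Prop :=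
  ∀ row ∈ relation, relation.length ≤ row.length
instance (relation : List (List Int)) : Decidable (Pre_get_blockers_by_R_strict relation) := by
  unfold Pre_get_blockers_by_R_strict; infer_instance

def pvWitness_get_blockers_by_R_strict : List (List Int) := [[0, 1], [1, 0]]

def Spec_get_blockers_by_R_strict (relation : List (List Int)) (out : List Int) : Prop := out = get_blockers_by_R_strict_alt relation
instance (relation : List (List Int)) (out : List Int) : Decidable (Spec_get_blockers_by_R_strict relation out) := by unfold Spec_get_blockers_by_R_strict; infer_instance

-- ===== CLAIM (what is proved, stated in full; the proofs are below) =====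
def Claim_equal_get_blockers_by_R_strict : Prop := ∀ (relation : List (List Int)), Dom_get_blockers_by_R_strict relation → Pre_get_blockers_by_R_strict relation → Spec_get_blockers_by_R_strict relation (get_blockers_by_R_strict relation)

-- ===== LEMMAS AND PROOFS =====

-- A's inner loop with break is the 'all' of its test over the remaining indices
lemma pvAScan_eq_all (relation : List (List Int)) (j : Int) (is : List Int) :
    pvAScan relation j is
      = is.all (fun i => !decide (PySem.List.pyGetD (PySem.List.pyGetD relation i []) j 0 ≠ 0 ∧ j ≠ i)) := by
  induction is with
  | nil => rfl
  | cons i rest ih =>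
    simp only [pvAScan, List.all_cons]
    split_ifs with h <;> simp [h, ih]

-- B's fold of per-row filters is one filter by the conjunction of the row tests
lemma foldl_filter_eq_filter_all {α β : Type} (q : β → α → Bool) (l : List β) :
    ∀ (init : List α),
    (l.foldl (fun cand b => cand.filter (q b)) init)
      = init.filter (fun a => l.all (fun b => q b a)) := by
  induction l with
  | nil => intro init; simp
  | cons b rest ih =>
    intro init
    simp only [List.foldl_cons, ih, List.filter_filter, List.all_cons]
    exact List.filter_congr (fun a _ => by rw [Bool.and_comm])

-- membership in enumerate
lemma mem_enumerate_iff {α : Type} (xs : List α) (s : Int) (p : Int × α) :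
    p ∈ PySem.List.enumerate xs s ↔ ∃ m : Nat, ∃ hm : m < xs.length, p = (s + m, xs[m]) := by
  induction xs generalizing s with
  | nil => simp [PySem.List.enumerate]
  | cons x xs ih =>
    rw [PySem.List.enumerate_cons]
    constructor
    · intro hp
      rcases List.mem_cons.mp hp with h | h
      · exact ⟨0, by simp, by simpa using h⟩
      · rcases (ih (s + 1)).mp h with ⟨m, hm, hpe⟩
        exact ⟨m + 1, by simpa using hm, by simp [hpe]; ring⟩
    · rintro ⟨m, hm, rfl⟩
      cases m with
      | zero => simp
      | succ m =>
        refine List.mem_cons.mpr (Or.inr ((ih (s + 1)).mpr ⟨m, by simpa using hm, ?_⟩))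
        simp; ring

-- pointwise: A's column scan equals B's conjunction of row tests
lemma point_eq (relation : List (List Int)) (j : Int) :
    pvAScan relation j (PySem.List.pyRange 0 (relation.length : Int) 1)
      = (PySem.List.enumerate relation).all
          (fun ir => decide (j = ir.1) || decide (PySem.List.pyGetD ir.2 j 0 = 0)) := by
  rw [pvAScan_eq_all, Bool.eq_iff_iff]
  simp only [List.all_eq_true, PySem.List.mem_pyRange_one, Bool.not_eq_eq_eq_not, Bool.not_true,
    decide_eq_false_iff_not, Bool.or_eq_true, decide_eq_true_eq]
  constructor
  · intro h ir hir
    rcases (mem_enumerate_iff relation 0 ir).mp hir with ⟨m, hm, rfl⟩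
    have := h (m : Int) ⟨by positivity, by exact_mod_cast hm⟩
    rw [PySem.List.pyGetD_natCast relation m [], List.getD_eq_getElem relation [] hm] at this
    simp only [zero_add]
    by_cases hj : j = (m : Int)
    · exact Or.inl hj
    · exact Or.inr (by tauto)
  · intro h i ⟨hi0, hin⟩
    have him : i.toNat < relation.length := by omega
    have hir : ((0 : Int) + (i.toNat : Int), relation[i.toNat]) ∈ PySem.List.enumerate relation :=
      (mem_enumerate_iff relation 0 _).mpr ⟨i.toNat, him, rfl⟩
    have hi : i = ((i.toNat : Nat) : Int) := (Int.toNat_of_nonneg hi0).symm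
    rcases h _ hir with hc | hc
    · simp only [zero_add] at hc
      intro ⟨_, hne⟩; exact hne (by omega)
    · rw [hi, PySem.List.pyGetD_natCast relation i.toNat [],
        List.getD_eq_getElem relation [] him]
      tauto

-- ===== VERDICT (by name: the statement is the Claim_ definition above) =====
theorem get_blockers_by_R_strict_spec : Claim_equal_get_blockers_by_R_strict := by
  intro relation _ _
  unfold Spec_get_blockers_by_R_strict get_blockers_by_R_strict get_blockers_by_R_strict_alt
  rw [foldl_filter_eq_filter_all, PySem.List.foldl_append_if_eq_filter]
  refine (List.filter_congr ?_).symm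
  intro j _
  exact (point_eq relation j).symm
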